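-- pv_equiv track=rewrite | github.com/Arkar224/ROSpace-3431 | src/color_retriever.py | calculate_color_bounds
-- ===== SOURCE A (Python) =====
-- TOLERANCE_H = 10
--
-- TOLERANCE_S = 20
--
-- TOLERANCE_V = 20
--
-- def calculate_color_bounds(color_points):
--     """Calculate HSV bounds from color points"""
--     if len(color_points) < 2:
--         return {'h_min': 0, 'h_max': 179, 's_min': 0, 's_max': 255, 'v_min': 0, 'v_max': 255}
--
--     # Calculate range from color points
--     h_values = [point[0] for point in color_points]
--     s_values = [point[1] for point in color_points]
--     v_values = [point[2] for point in color_points]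
--
--     # Expand range to include all selected points with tolerance
--     h_min = max(0, min(h_values) - TOLERANCE_H)
--     h_max = min(179, max(h_values) + TOLERANCE_H)
--     s_min = max(0, min(s_values) - TOLERANCE_S)
--     s_max = min(255, max(s_values) + TOLERANCE_S)
--     v_min = max(0, min(v_values) - TOLERANCE_V)
--     v_max = min(255, max(v_values) + TOLERANCE_V)
--
--     return {
--         'h_min': h_min, 'h_max': h_max,
--         's_min': s_min, 's_max': s_max,
--         'v_min': v_min, 'v_max': v_max
--     }
-- ===== SOURCE B (Python) =====
-- TOLERANCE_H = 10
--
-- TOLERANCE_S = 20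
--
-- TOLERANCE_V = 20
--
-- def calculate_color_bounds(color_points):
--     """Calculate HSV bounds from color points (single fused pass over the points)"""
--     if len(color_points) < 2:
--         return {'h_min': 0, 'h_max': 179, 's_min': 0, 's_max': 255, 'v_min': 0, 'v_max': 255}
--
--     h0, s0, v0 = color_points[0]
--     h_lo = h_hi = h0
--     s_lo = s_hi = s0
--     v_lo = v_hi = v0
--     for h, s, v in color_points[1:]:
--         if h < h_lo: h_lo = h
--         if h > h_hi: h_hi = h
--         if s < s_lo: s_lo = s
--         if s > s_hi: s_hi = s
--         if v < v_lo: v_lo = v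
--         if v > v_hi: v_hi = v
--
--     return {
--         'h_min': max(0, h_lo - TOLERANCE_H), 'h_max': min(179, h_hi + TOLERANCE_H),
--         's_min': max(0, s_lo - TOLERANCE_S), 's_max': min(255, s_hi + TOLERANCE_S),
--         'v_min': max(0, v_lo - TOLERANCE_V), 'v_max': min(255, v_hi + TOLERANCE_V)
--     }
-- ===== Notes on version B (the rewrite author's own statement) =====
-- stated objective: alternative
-- what changed: Replaced the three list comprehensions plus six min/max reductions with one fused pass that maintains six running extrema seeded from the first point.
import Mathlib
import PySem

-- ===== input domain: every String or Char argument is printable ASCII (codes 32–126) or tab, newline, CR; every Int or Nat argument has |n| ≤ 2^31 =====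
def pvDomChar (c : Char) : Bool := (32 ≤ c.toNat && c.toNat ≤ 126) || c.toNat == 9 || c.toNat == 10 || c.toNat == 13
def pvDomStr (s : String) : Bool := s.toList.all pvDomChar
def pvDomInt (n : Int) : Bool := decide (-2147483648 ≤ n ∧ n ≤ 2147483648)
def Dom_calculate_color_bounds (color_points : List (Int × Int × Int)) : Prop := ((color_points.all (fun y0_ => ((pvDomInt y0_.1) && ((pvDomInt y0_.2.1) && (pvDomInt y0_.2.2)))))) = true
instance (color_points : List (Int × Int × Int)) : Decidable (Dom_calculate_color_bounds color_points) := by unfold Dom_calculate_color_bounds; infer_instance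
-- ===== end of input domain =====

-- B replaces three list comprehensions plus six min/max reductions by one fused pass keeping six running extrema (alternative decomposition, same O(n) cost).


-- ===== PORT A =====
-- min(xs)/max(xs) on the (guaranteed nonempty) value lists: PySem.List.min?/max? with .getD 0
-- (the default is never used since the lists are nonempty when this branch runs).
def calculate_color_bounds (color_points : List (Int × Int × Int)) : List (String × Int) :=
  if color_points.length < 2 then
    [("h_min", 0), ("h_max", 179), ("s_min", 0), ("s_max", 255), ("v_min", 0), ("v_max", 255)]
  else
    let h_values := color_points.map (fun point => point.1)
    let s_values := color_points.map (fun point => point.2.1)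
    let v_values := color_points.map (fun point => point.2.2)
    let h_min := max 0 ((PySem.List.min? h_values (fun x => x)).getD 0 - 10)
    let h_max := min 179 ((PySem.List.max? h_values (fun x => x)).getD 0 + 10)
    let s_min := max 0 ((PySem.List.min? s_values (fun x => x)).getD 0 - 20)
    let s_max := min 255 ((PySem.List.max? s_values (fun x => x)).getD 0 + 20)
    let v_min := max 0 ((PySem.List.min? v_values (fun x => x)).getD 0 - 20)
    let v_max := min 255 ((PySem.List.max? v_values (fun x => x)).getD 0 + 20)
    [("h_min", h_min), ("h_max", h_max), ("s_min", s_min), ("s_max", s_max),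
     ("v_min", v_min), ("v_max", v_max)]

-- ===== PORT B =====
-- the fused loop over color_points[1:], updating six running extrema
def ccbLoop : List (Int × Int × Int) → Int → Int → Int → Int → Int → Int →
    Int × Int × Int × Int × Int × Int
  | [], hlo, hhi, slo, shi, vlo, vhi => (hlo, hhi, slo, shi, vlo, vhi)
  | (h, s, v) :: t, hlo, hhi, slo, shi, vlo, vhi =>
      ccbLoop t (if h < hlo then h else hlo) (if h > hhi then h else hhi)
                (if s < slo then s else slo) (if s > shi then s else shi)
                (if v < vlo then v else vlo) (if v > vhi then v else vhi)

def calculate_color_bounds_alt (color_points : List (Int × Int × Int)) : List (String × Int) :=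
  match color_points with
  | (h0, s0, v0) :: p2 :: rest =>
      let r := ccbLoop (p2 :: rest) h0 h0 s0 s0 v0 v0
      [("h_min", max 0 (r.1 - 10)), ("h_max", min 179 (r.2.1 + 10)),
       ("s_min", max 0 (r.2.2.1 - 20)), ("s_max", min 255 (r.2.2.2.1 + 20)),
       ("v_min", max 0 (r.2.2.2.2.1 - 20)), ("v_max", min 255 (r.2.2.2.2.2 + 20))]
  | _ =>
    [("h_min", 0), ("h_max", 179), ("s_min", 0), ("s_max", 255), ("v_min", 0), ("v_max", 255)]

-- ===== PRECONDITION & SPEC =====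
def Spec_calculate_color_bounds (color_points : List (Int × Int × Int)) (out : List (String × Int)) : Prop := out = calculate_color_bounds_alt color_points
instance (color_points : List (Int × Int × Int)) (out : List (String × Int)) : Decidable (Spec_calculate_color_bounds color_points out) := by unfold Spec_calculate_color_bounds; infer_instance

-- ===== CLAIM (what is proved, stated in full; the proofs are below) =====
def Claim_equal_calculate_color_bounds : Prop := ∀ (color_points : List (Int × Int × Int)), Dom_calculate_color_bounds color_points → Spec_calculate_color_bounds color_points (calculate_color_bounds color_points)

-- ===== LEMMAS AND PROOFS =====
theorem ccbLoop_eq (rest : List (Int × Int × Int)) : ∀ a b c d e f : Int,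
    ccbLoop rest a b c d e f =
      (rest.foldl (fun m p => min m p.1) a,
       rest.foldl (fun m p => max m p.1) b,
       rest.foldl (fun m p => min m p.2.1) c,
       rest.foldl (fun m p => max m p.2.1) d,
       rest.foldl (fun m p => min m p.2.2) e,
       rest.foldl (fun m p => max m p.2.2) f) := by
  induction rest with
  | nil => intro a b c d e f; simp [ccbLoop]
  | cons p t ih =>
      intro a b c d e f
      obtain ⟨h, s, v⟩ := p
      simp only [ccbLoop, List.foldl_cons, ih]
      rw [show (if h < a then h else a) = min a h by rw [min_def]; split_ifs <;> omega,
          show (if h > b then h else b) = max b h by rw [max_def]; split_ifs <;> omega,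
          show (if s < c then s else c) = min c s by rw [min_def]; split_ifs <;> omega,
          show (if s > d then s else d) = max d s by rw [max_def]; split_ifs <;> omega,
          show (if v < e then v else e) = min e v by rw [min_def]; split_ifs <;> omega,
          show (if v > f then v else f) = max f v by rw [max_def]; split_ifs <;> omega]

-- ===== VERDICT (by name: the statement is the Claim_ definition above) =====
theorem calculate_color_bounds_spec : Claim_equal_calculate_color_bounds := by
  intro cp _
  unfold Spec_calculate_color_bounds
  match cp with
  | [] => rfl
  | [_] => rfl
  | p :: q :: t =>
      obtain ⟨h0, s0, v0⟩ := p
      simp only [calculate_color_bounds, calculate_color_bounds_alt, List.length_cons,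
        List.map_cons, PySem.List.min?_id_cons, PySem.List.max?_id_cons, List.foldl_cons,
        List.foldl_map, Option.getD_some, ccbLoop_eq]
      norm_num
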